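-- pv_equiv track=rewrite | github.com/OliDeane/ns-icrl | src/generate_prolog_files.py | get_constraint_files_inds
-- ===== SOURCE A (Python) =====
-- def get_constraint_files_inds(file_names):
--     s_c_i = [i for i, s in enumerate(
--         file_names) if 'state_constraints_' in s]
--     if len(s_c_i) != 0:
--         s_c_i = s_c_i[0]
--     else:
--         s_c_i = None
--
--     c_i = [i for i, s in enumerate(
--         file_names) if ('constraints_' in s) and ('state constraints_' not in s)]
--     if len(c_i) != 0:
--         c_i = c_i[0]
--     else:
--         c_i = None
--
--     v_s_a_i = [i for i, s in enumerate(
--         file_names) if 'valid_state_actions_' in s]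
--     if len(v_s_a_i) != 0:
--         v_s_a_i = v_s_a_i[0]
--     else:
--         v_s_a_i = None
--
--     v_s_i = [i for i, s in enumerate(
--         file_names) if 'valid_states_' in s]
--     if len(v_s_i) != 0:
--         v_s_i = v_s_i[0]
--     else:
--         v_s_i = None
--
--     policy_inds = [i for i, s in enumerate(
--         file_names) if 'policy' in s]
--
--     return s_c_i, c_i, v_s_a_i, v_s_i, policy_inds
-- ===== SOURCE B (Python) =====
-- def get_constraint_files_inds(file_names):
--     s_c_i = c_i = v_s_a_i = v_s_i = None
--     policy_inds = []
--     for i, s in enumerate(file_names):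
--         if s_c_i is None and 'state_constraints_' in s:
--             s_c_i = i
--         if c_i is None and 'constraints_' in s and 'state constraints_' not in s:
--             c_i = i
--         if v_s_a_i is None and 'valid_state_actions_' in s:
--             v_s_a_i = i
--         if v_s_i is None and 'valid_states_' in s:
--             v_s_i = i
--         if 'policy' in s:
--             policy_inds.append(i)
--     return s_c_i, c_i, v_s_a_i, v_s_i, policy_inds
-- ===== Notes on version B (the rewrite author's own statement) =====
-- stated objective: faster
-- what changed: Replaced five separate enumerate-comprehension passes (each followed by a first-element extraction) with one single pass maintaining four first-match index variables and the policy list.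
import Mathlib
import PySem

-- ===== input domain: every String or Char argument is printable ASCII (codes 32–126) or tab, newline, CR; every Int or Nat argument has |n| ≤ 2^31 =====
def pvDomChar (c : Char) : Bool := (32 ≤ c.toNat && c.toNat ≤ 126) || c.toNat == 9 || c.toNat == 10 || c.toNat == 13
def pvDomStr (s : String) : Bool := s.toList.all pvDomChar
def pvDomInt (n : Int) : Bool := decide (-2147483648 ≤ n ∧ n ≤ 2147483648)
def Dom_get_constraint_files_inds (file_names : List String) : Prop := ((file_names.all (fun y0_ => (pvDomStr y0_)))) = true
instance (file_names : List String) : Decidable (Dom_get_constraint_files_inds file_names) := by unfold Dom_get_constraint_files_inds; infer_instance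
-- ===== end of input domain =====

-- ===== PORT A =====
-- Header: B merges A's five enumerate-comprehension passes into one single loop (objective: simpler).
def pvFirstInd (file_names : List String) (p : String → Bool) : Option Int :=
  let l := ((PySem.List.enumerate file_names 0).filter (fun q => p q.2)).map (fun q => q.1)
  if l.length ≠ 0 then some (l.headD 0) else none

def get_constraint_files_inds (file_names : List String) : Option Int × Option Int × Option Int × Option Int × List Int :=
  let s_c_i := pvFirstInd file_names (fun s => PySem.Str.isIn "state_constraints_" s)
  let c_i := pvFirstInd file_names (fun s => PySem.Str.isIn "constraints_" s && !PySem.Str.isIn "state constraints_" s)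
  let v_s_a_i := pvFirstInd file_names (fun s => PySem.Str.isIn "valid_state_actions_" s)
  let v_s_i := pvFirstInd file_names (fun s => PySem.Str.isIn "valid_states_" s)
  let policy_inds := ((PySem.List.enumerate file_names 0).filter (fun q => PySem.Str.isIn "policy" q.2)).map (fun q => q.1)
  (s_c_i, c_i, v_s_a_i, v_s_i, policy_inds)

-- ===== PORT B =====
def pvLoopB : List (Int × String) → Option Int → Option Int → Option Int → Option Int → List Int →
    Option Int × Option Int × Option Int × Option Int × List Int
  | [], s_c_i, c_i, v_s_a_i, v_s_i, policy_inds => (s_c_i, c_i, v_s_a_i, v_s_i, policy_inds)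
  | (i, s) :: rest, s_c_i, c_i, v_s_a_i, v_s_i, policy_inds =>
    let s_c_i := if s_c_i.isNone && PySem.Str.isIn "state_constraints_" s then some i else s_c_i
    let c_i := if c_i.isNone && (PySem.Str.isIn "constraints_" s && !PySem.Str.isIn "state constraints_" s) then some i else c_i
    let v_s_a_i := if v_s_a_i.isNone && PySem.Str.isIn "valid_state_actions_" s then some i else v_s_a_i
    let v_s_i := if v_s_i.isNone && PySem.Str.isIn "valid_states_" s then some i else v_s_i
    let policy_inds := if PySem.Str.isIn "policy" s then policy_inds ++ [i] else policy_inds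
    pvLoopB rest s_c_i c_i v_s_a_i v_s_i policy_inds

def get_constraint_files_inds_alt (file_names : List String) : Option Int × Option Int × Option Int × Option Int × List Int :=
  pvLoopB (PySem.List.enumerate file_names 0) none none none none []

-- ===== PRECONDITION & SPEC =====
def Spec_get_constraint_files_inds (file_names : List String) (out : Option Int × Option Int × Option Int × Option Int × List Int) : Prop := out = get_constraint_files_inds_alt file_names
instance (file_names : List String) (out : Option Int × Option Int × Option Int × Option Int × List Int) : Decidable (Spec_get_constraint_files_inds file_names out) := by unfold Spec_get_constraint_files_inds; infer_instance

-- ===== CLAIM (what is proved, stated in full; the proofs are below) =====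
def Claim_equal_get_constraint_files_inds : Prop := ∀ (file_names : List String), Dom_get_constraint_files_inds file_names → Spec_get_constraint_files_inds file_names (get_constraint_files_inds file_names)

-- ===== LEMMAS AND PROOFS =====

theorem pvStepFirst (p : Int × String → Bool) (x : Int × String) (tl : List (Int × String)) (o : Option Int) :
    ((if o.isNone && p x then some x.1 else o).or (((tl.filter p).map (fun q => q.1)).head?))
      = o.or ((((x :: tl).filter p).map (fun q => q.1)).head?) := by
  cases o <;> cases hp : p x <;> simp [hp]

theorem pvStepPol (p : Int × String → Bool) (x : Int × String) (tl : List (Int × String)) (pol : List Int) :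
    (if p x then pol ++ [x.1] else pol) ++ (tl.filter p).map (fun q => q.1)
      = pol ++ ((x :: tl).filter p).map (fun q => q.1) := by
  cases hp : p x <;> simp [hp]

theorem pvLoopB_eq (l : List (Int × String)) (a b c d : Option Int) (pol : List Int) :
    pvLoopB l a b c d pol =
      (a.or (((l.filter (fun q => PySem.Str.isIn "state_constraints_" q.2)).map (fun q => q.1)).head?),
       b.or (((l.filter (fun q => PySem.Str.isIn "constraints_" q.2 && !PySem.Str.isIn "state constraints_" q.2)).map (fun q => q.1)).head?),
       c.or (((l.filter (fun q => PySem.Str.isIn "valid_state_actions_" q.2)).map (fun q => q.1)).head?),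
       d.or (((l.filter (fun q => PySem.Str.isIn "valid_states_" q.2)).map (fun q => q.1)).head?),
       pol ++ (l.filter (fun q => PySem.Str.isIn "policy" q.2)).map (fun q => q.1)) := by
  induction l generalizing a b c d pol with
  | nil => simp [pvLoopB]
  | cons hd tl ih =>
    obtain ⟨i, s⟩ := hd
    simp only [pvLoopB, ih, Prod.mk.injEq]
    exact ⟨pvStepFirst (fun q => PySem.Str.isIn "state_constraints_" q.2) (i, s) tl a,
           pvStepFirst (fun q => PySem.Str.isIn "constraints_" q.2 && !PySem.Str.isIn "state constraints_" q.2) (i, s) tl b,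
           pvStepFirst (fun q => PySem.Str.isIn "valid_state_actions_" q.2) (i, s) tl c,
           pvStepFirst (fun q => PySem.Str.isIn "valid_states_" q.2) (i, s) tl d,
           pvStepPol (fun q => PySem.Str.isIn "policy" q.2) (i, s) tl pol⟩

theorem pvFirstInd_eq (fn : List String) (p : String → Bool) :
    pvFirstInd fn p = (((PySem.List.enumerate fn 0).filter (fun q => p q.2)).map (fun q => q.1)).head? := by
  unfold pvFirstInd
  cases h : ((PySem.List.enumerate fn 0).filter (fun q => p q.2)).map (fun q => q.1) <;> simp_all

-- ===== VERDICT (by name: the statement is the Claim_ definition above) =====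
theorem get_constraint_files_inds_spec : Claim_equal_get_constraint_files_inds := by
  intro fn _
  unfold Spec_get_constraint_files_inds get_constraint_files_inds get_constraint_files_inds_alt
  rw [pvLoopB_eq]
  simp [pvFirstInd_eq]
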